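-- pv_equiv track=rewrite | github.com/mcxu/code-sandbox | PythonSandbox/leetcode/128_longest_consecutive_sequence.py | dfs
-- ===== SOURCE A (Python) =====
-- def dfs(n, numSet, visited):
--     stack = [n]
--     count = 0
--     while stack:
--         currNum = stack.pop(-1)
--
--         if currNum not in visited:
--             visited.add(currNum)
--
--             count += 1
--
--             if currNum-1 in numSet:
--                 stack.append(currNum-1)
--             if currNum+1 in numSet:
--                 stack.append(currNum+1)
--     return count
-- ===== SOURCE B (Python) =====
-- def dfs(n, numSet, visited):
--     if n in visited:
--         return 0
--     visited.add(n)
--     count = 1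
--     m = n - 1
--     while m in numSet and m not in visited:
--         visited.add(m)
--         count += 1
--         m -= 1
--     m = n + 1
--     while m in numSet and m not in visited:
--         visited.add(m)
--         count += 1
--         m += 1
--     return count
-- ===== Notes on version B (the rewrite author's own statement) =====
-- stated objective: simpler
-- what changed: Replaces the explicit-stack DFS over the set with a seed check plus two straight-line scans (downward then upward) that extend the run while the neighbour is in numSet and unvisited.
import Mathlib
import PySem

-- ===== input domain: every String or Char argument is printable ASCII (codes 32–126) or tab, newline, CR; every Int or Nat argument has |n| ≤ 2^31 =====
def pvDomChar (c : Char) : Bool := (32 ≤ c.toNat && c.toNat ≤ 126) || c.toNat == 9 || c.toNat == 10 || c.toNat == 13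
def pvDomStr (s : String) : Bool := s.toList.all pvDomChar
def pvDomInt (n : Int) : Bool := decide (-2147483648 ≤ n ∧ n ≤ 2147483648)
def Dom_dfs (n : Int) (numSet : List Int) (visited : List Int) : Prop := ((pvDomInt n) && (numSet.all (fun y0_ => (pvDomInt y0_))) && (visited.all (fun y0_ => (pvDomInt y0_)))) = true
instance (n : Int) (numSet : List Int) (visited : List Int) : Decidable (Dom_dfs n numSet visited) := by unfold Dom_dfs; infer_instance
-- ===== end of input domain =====

-- B replaces A's explicit-stack DFS with a seed check plus two straight-line scans (down, then up);
-- return-value equivalence is proved; both A and B mutate `visited` in Python (same final set contents, insertion order may differ).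


-- ===== PORT A =====
-- termination bookkeeping for the loops below (cited by `decreasing_by`)
theorem pv_card_sdiff_append_lt (U : List Int) (V : List Int) (m : Int)
    (hmU : m ∈ U) (hmV : m ∉ V) :
    (U.toFinset \ (V ++ [m]).toFinset).card < (U.toFinset \ V.toFinset).card := by
  apply Finset.card_lt_card
  rw [Finset.ssubset_def]
  constructor
  · intro x hx
    simp only [Finset.mem_sdiff, List.mem_toFinset, List.mem_append, List.mem_singleton] at hx ⊢
    tauto
  · intro hc
    have hm : m ∈ U.toFinset \ V.toFinset := by
      simp [Finset.mem_sdiff, List.mem_toFinset, hmU, hmV]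
    have := hc hm
    simp [Finset.mem_sdiff, List.mem_toFinset] at this

theorem pv_dfsLoop_dec (S rest V : List Int) (m : Int) (hm : m ∉ V) :
    2 * ((((if m + 1 ∈ S then [m + 1] else []) ++ (if m - 1 ∈ S then [m - 1] else []) ++ rest) ++ S).toFinset \ (PySem.Set.add V m).toFinset).card
      + ((if m + 1 ∈ S then [m + 1] else []) ++ (if m - 1 ∈ S then [m - 1] else []) ++ rest).length
    < 2 * (((m :: rest) ++ S).toFinset \ V.toFinset).card + (m :: rest).length := by
  rw [PySem.Set.add_of_not_mem hm]
  have hlen : ((if m + 1 ∈ S then [m + 1] else ([] : List Int)) ++ (if m - 1 ∈ S then [m - 1] else []) ++ rest).length ≤ rest.length + 2 := by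
    split_ifs <;> simp
  have hsub : ((((if m + 1 ∈ S then [m + 1] else []) ++ (if m - 1 ∈ S then [m - 1] else []) ++ rest) ++ S).toFinset \ (V ++ [m]).toFinset)
      ⊆ (((m :: rest) ++ S).toFinset \ (V ++ [m]).toFinset) := by
    intro x hx
    simp only [Finset.mem_sdiff, List.mem_toFinset, List.mem_append, List.mem_cons] at hx ⊢
    have h1 : x ∈ (if m + 1 ∈ S then [m + 1] else ([] : List Int)) → x ∈ S := by
      split <;> simp_all
    have h2 : x ∈ (if m - 1 ∈ S then [m - 1] else ([] : List Int)) → x ∈ S := by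
      split <;> simp_all
    tauto
  have hlt := pv_card_sdiff_append_lt ((m :: rest) ++ S) V m (by simp) hm
  have hle := Finset.card_le_card hsub
  simp only [List.length_cons] at *
  omega

theorem pv_dfsLoop_dec_skip (S rest V : List Int) (m : Int) :
    2 * ((rest ++ S).toFinset \ V.toFinset).card + rest.length
    < 2 * (((m :: rest) ++ S).toFinset \ V.toFinset).card + (m :: rest).length := by
  have hsub : ((rest ++ S).toFinset \ V.toFinset) ⊆ (((m :: rest) ++ S).toFinset \ V.toFinset) := by
    intro x hx
    simp only [Finset.mem_sdiff, List.mem_toFinset, List.mem_append, List.mem_cons] at hx ⊢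
    tauto
  have := Finset.card_le_card hsub
  simp only [List.length_cons]
  omega

-- the while-loop over `stack` (kept top-first: Python appends at the right and pops the last,
-- so `currNum+1` — appended second — sits at the head here)
def dfsLoop (numSet : List Int) (stack : List Int) (visited : List Int) (count : Int) : Int :=
  match stack with
  | [] => count
  | currNum :: rest =>
    if currNum ∉ visited then
      dfsLoop numSet
        ((if currNum + 1 ∈ numSet then [currNum + 1] else []) ++
         (if currNum - 1 ∈ numSet then [currNum - 1] else []) ++ rest)
        (PySem.Set.add visited currNum) (count + 1)
    else
      dfsLoop numSet rest visited count
termination_by 2 * ((stack ++ numSet).toFinset \ visited.toFinset).card + stack.length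
decreasing_by
  · exact pv_dfsLoop_dec numSet rest visited currNum (by assumption)
  · exact pv_dfsLoop_dec_skip numSet rest visited currNum

def dfs (n : Int) (numSet : List Int) (visited : List Int) : Int :=
  dfsLoop numSet [n] visited 0

-- ===== PORT B =====
theorem pv_scan_dec (S V : List Int) (m : Int) (h : m ∈ S ∧ m ∉ V) :
    (S.toFinset \ (PySem.Set.add V m).toFinset).card < (S.toFinset \ V.toFinset).card := by
  rw [PySem.Set.add_of_not_mem h.2]
  exact pv_card_sdiff_append_lt S V m h.1 h.2

-- first while-loop of B: walk downward while the neighbour is in numSet and unvisited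
def scanDown (numSet : List Int) (m : Int) (visited : List Int) (count : Int) : Int × List Int :=
  if h : m ∈ numSet ∧ m ∉ visited then
    scanDown numSet (m - 1) (PySem.Set.add visited m) (count + 1)
  else
    (count, visited)
termination_by (numSet.toFinset \ visited.toFinset).card
decreasing_by
  exact pv_scan_dec numSet visited m h

-- second while-loop of B: walk upward
def scanUp (numSet : List Int) (m : Int) (visited : List Int) (count : Int) : Int × List Int :=
  if h : m ∈ numSet ∧ m ∉ visited then
    scanUp numSet (m + 1) (PySem.Set.add visited m) (count + 1)
  else
    (count, visited)
termination_by (numSet.toFinset \ visited.toFinset).card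
decreasing_by
  exact pv_scan_dec numSet visited m h

def dfs_alt (n : Int) (numSet : List Int) (visited : List Int) : Int :=
  if n ∈ visited then 0
  else
    let visited1 := PySem.Set.add visited n
    let r1 := scanDown numSet (n - 1) visited1 1
    (scanUp numSet (n + 1) r1.2 r1.1).1

-- ===== PRECONDITION & SPEC =====
def Spec_dfs (n : Int) (numSet : List Int) (visited : List Int) (out : Int) : Prop := out = dfs_alt n numSet visited
instance (n : Int) (numSet : List Int) (visited : List Int) (out : Int) : Decidable (Spec_dfs n numSet visited out) := by unfold Spec_dfs; infer_instance

-- ===== CLAIM (what is proved, stated in full; the proofs are below) =====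
def Claim_equal_dfs : Prop := ∀ (n : Int) (numSet : List Int) (visited : List Int), Dom_dfs n numSet visited → Spec_dfs n numSet visited (dfs n numSet visited)

-- ===== LEMMAS AND PROOFS =====

theorem scanUp_shift (S : List Int) (m : Int) (V : List Int) (c c' : Int) :
    scanUp S m V c = ((scanUp S m V c').1 + (c - c'), (scanUp S m V c').2) := by
  fun_induction scanUp S m V c generalizing c' with
  | case1 m V c h ih =>
    rw [ih (c' + 1)]
    have hstep : scanUp S m V c' = scanUp S (m + 1) (PySem.Set.add V m) (c' + 1) := by
      rw [scanUp, dif_pos h]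
    rw [hstep]
    have : c + 1 - (c' + 1) = c - c' := by ring
    rw [this]
  | case2 m V c h =>
    have hstep : scanUp S m V c' = (c', V) := by rw [scanUp, dif_neg h]
    rw [hstep]
    simp

theorem scanDown_shift (S : List Int) (m : Int) (V : List Int) (c c' : Int) :
    scanDown S m V c = ((scanDown S m V c').1 + (c - c'), (scanDown S m V c').2) := by
  fun_induction scanDown S m V c generalizing c' with
  | case1 m V c h ih =>
    rw [ih (c' + 1)]
    have hstep : scanDown S m V c' = scanDown S (m - 1) (PySem.Set.add V m) (c' + 1) := by
      rw [scanDown, dif_pos h]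
    rw [hstep]
    have : c + 1 - (c' + 1) = c - c' := by ring
    rw [this]
  | case2 m V c h =>
    have hstep : scanDown S m V c' = (c', V) := by rw [scanDown, dif_neg h]
    rw [hstep]
    simp

theorem scanUp_visited (S : List Int) (m : Int) (V : List Int) (c : Int) :
    ∃ L, (scanUp S m V c).2 = V ++ L ∧ ∀ x ∈ L, m ≤ x := by
  fun_induction scanUp S m V c with
  | case1 m V c h ih =>
    obtain ⟨L, hL, hall⟩ := ih
    refine ⟨m :: L, ?_, ?_⟩
    · rw [hL, PySem.Set.add_of_not_mem h.2]; simp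
    · intro x hx
      simp only [List.mem_cons] at hx
      rcases hx with rfl | hx2
      · omega
      · have := hall x hx2; omega
  | case2 m V c h => exact ⟨[], by simp, by simp⟩

theorem scanDown_visited (S : List Int) (m : Int) (V : List Int) (c : Int) :
    ∃ L, (scanDown S m V c).2 = V ++ L ∧ ∀ x ∈ L, x ≤ m := by
  fun_induction scanDown S m V c with
  | case1 m V c h ih =>
    obtain ⟨L, hL, hall⟩ := ih
    refine ⟨m :: L, ?_, ?_⟩
    · rw [hL, PySem.Set.add_of_not_mem h.2]; simp
    · intro x hx
      simp only [List.mem_cons] at hx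
      rcases hx with rfl | hx2
      · omega
      · have := hall x hx2; omega
  | case2 m V c h => exact ⟨[], by simp, by simp⟩

theorem scanUp_congr (S : List Int) (m : Int) (V W : List Int) (c : Int)
    (h : ∀ y : Int, m ≤ y → (y ∈ V ↔ y ∈ W)) :
    (scanUp S m V c).1 = (scanUp S m W c).1 := by
  fun_induction scanUp S m V c generalizing W with
  | case1 m V c hc ih =>
    have hmW : m ∉ W := fun hw => hc.2 ((h m le_rfl).mpr hw)
    have hstep : scanUp S m W c = scanUp S (m + 1) (PySem.Set.add W m) (c + 1) := by
      rw [scanUp, dif_pos ⟨hc.1, hmW⟩]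
    rw [hstep]
    apply ih
    intro y hy
    rw [PySem.Set.add_of_not_mem hc.2, PySem.Set.add_of_not_mem hmW]
    simp only [List.mem_append, List.mem_singleton]
    have hne : y ≠ m := by omega
    have := h y (by omega)
    tauto
  | case2 m V c hc =>
    have hstep : scanUp S m W c = (c, W) := by
      rw [scanUp, dif_neg]
      intro hcon
      exact hc ⟨hcon.1, fun hv => hcon.2 ((h m le_rfl).mp hv)⟩
    rw [hstep]

theorem scanDown_congr (S : List Int) (m : Int) (V W : List Int) (c : Int)
    (h : ∀ y : Int, y ≤ m → (y ∈ V ↔ y ∈ W)) :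
    (scanDown S m V c).1 = (scanDown S m W c).1 := by
  fun_induction scanDown S m V c generalizing W with
  | case1 m V c hc ih =>
    have hmW : m ∉ W := fun hw => hc.2 ((h m le_rfl).mpr hw)
    have hstep : scanDown S m W c = scanDown S (m - 1) (PySem.Set.add W m) (c + 1) := by
      rw [scanDown, dif_pos ⟨hc.1, hmW⟩]
    rw [hstep]
    apply ih
    intro y hy
    rw [PySem.Set.add_of_not_mem hc.2, PySem.Set.add_of_not_mem hmW]
    simp only [List.mem_append, List.mem_singleton]
    have hne : y ≠ m := by omega
    have := h y (by omega)
    tauto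
  | case2 m V c hc =>
    have hstep : scanDown S m W c = (c, W) := by
      rw [scanDown, dif_neg]
      intro hcon
      exact hc ⟨hcon.1, fun hv => hcon.2 ((h m le_rfl).mp hv)⟩
    rw [hstep]

theorem up_phase (S : List Int) (m : Int) (V : List Int) (c : Int) (rest : List Int)
    (hmS : m ∈ S) (hprev : m - 1 ∈ V ∨ m - 1 ∉ S) :
    dfsLoop S (m :: rest) V c = dfsLoop S rest (scanUp S m V c).2 (scanUp S m V c).1 := by
  fun_induction scanUp S m V c generalizing rest with
  | case1 m V c hc ih =>
    rw [dfsLoop, if_pos hc.2]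
    by_cases h2 : m + 1 ∈ S
    · rw [if_pos h2]
      rw [show ([m + 1] ++ (if m - 1 ∈ S then [m - 1] else []) ++ rest)
            = (m + 1) :: ((if m - 1 ∈ S then [m - 1] else []) ++ rest) from rfl]
      rw [ih ((if m - 1 ∈ S then [m - 1] else []) ++ rest) h2
            (Or.inl (by rw [show m + 1 - 1 = m from by ring]; exact (PySem.Set.mem_add _ _ _).mpr (Or.inr rfl)))]
      by_cases h1 : m - 1 ∈ S
      · rw [if_pos h1]
        have hv : m - 1 ∈ (scanUp S (m + 1) (PySem.Set.add V m) (c + 1)).2 := by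
          obtain ⟨L, hL, -⟩ := scanUp_visited S (m + 1) (PySem.Set.add V m) (c + 1)
          rw [hL, PySem.Set.add_of_not_mem hc.2]
          simp only [List.mem_append]
          exact Or.inl (Or.inl (hprev.resolve_right (fun hcon => hcon h1)))
        rw [List.singleton_append, dfsLoop, if_neg (not_not_intro hv)]
      · rw [if_neg h1, List.nil_append]
    · rw [if_neg h2, List.nil_append]
      have hstop : scanUp S (m + 1) (PySem.Set.add V m) (c + 1) = (c + 1, PySem.Set.add V m) := by
        rw [scanUp, dif_neg (fun hcon => h2 hcon.1)]
      rw [hstop]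
      by_cases h1 : m - 1 ∈ S
      · rw [if_pos h1]
        have hv : m - 1 ∈ PySem.Set.add V m :=
          (PySem.Set.mem_add _ _ _).mpr (Or.inl (hprev.resolve_right (fun hcon => hcon h1)))
        rw [List.singleton_append, dfsLoop, if_neg (not_not_intro hv)]
      · rw [if_neg h1, List.nil_append]
  | case2 m V c hc =>
    have hmV : m ∈ V := by
      by_contra hm
      exact hc ⟨hmS, hm⟩
    rw [dfsLoop, if_neg (not_not_intro hmV)]

theorem down_phase (S : List Int) (m : Int) (V : List Int) (c : Int) (rest : List Int)
    (hmS : m ∈ S) (hnext : m + 1 ∈ V ∨ m + 1 ∉ S) :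
    dfsLoop S (m :: rest) V c = dfsLoop S rest (scanDown S m V c).2 (scanDown S m V c).1 := by
  fun_induction scanDown S m V c generalizing rest with
  | case1 m V c hc ih =>
    rw [dfsLoop, if_pos hc.2]
    have step2 :
        dfsLoop S ((if m + 1 ∈ S then [m + 1] else []) ++ (if m - 1 ∈ S then [m - 1] else []) ++ rest)
          (PySem.Set.add V m) (c + 1)
        = dfsLoop S ((if m - 1 ∈ S then [m - 1] else []) ++ rest) (PySem.Set.add V m) (c + 1) := by
      by_cases h2 : m + 1 ∈ S
      · rw [if_pos h2]
        have hv : m + 1 ∈ PySem.Set.add V m :=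
          (PySem.Set.mem_add _ _ _).mpr (Or.inl (hnext.resolve_right (fun hcon => hcon h2)))
        rw [List.append_assoc, List.singleton_append]
        conv_lhs => rw [dfsLoop]
        rw [if_neg (not_not_intro hv)]
      · rw [if_neg h2, List.nil_append]
    rw [step2]
    by_cases h1 : m - 1 ∈ S
    · rw [if_pos h1, List.singleton_append]
      rw [ih rest h1
            (Or.inl (by rw [show m - 1 + 1 = m from by ring]; exact (PySem.Set.mem_add _ _ _).mpr (Or.inr rfl)))]
    · rw [if_neg h1, List.nil_append]
      have hstop : scanDown S (m - 1) (PySem.Set.add V m) (c + 1) = (c + 1, PySem.Set.add V m) := by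
        rw [scanDown, dif_neg (fun hcon => h1 hcon.1)]
      rw [hstop]
  | case2 m V c hc =>
    have hmV : m ∈ V := by
      by_contra hm
      exact hc ⟨hmS, hm⟩
    rw [dfsLoop, if_neg (not_not_intro hmV)]

-- ===== VERDICT (by name: the statement is the Claim_ definition above) =====
theorem dfs_spec : Claim_equal_dfs := by
  intro n S V _
  show dfs n S V = dfs_alt n S V
  by_cases hv : n ∈ V
  · rw [dfs, dfsLoop, if_neg (not_not_intro hv), dfsLoop, dfs_alt, if_pos hv]
  · have hlhs : dfs n S V
        = dfsLoop S (((if n + 1 ∈ S then [n + 1] else []) ++ (if n - 1 ∈ S then [n - 1] else []))) (PySem.Set.add V n) 1 := by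
      rw [dfs, dfsLoop, if_pos hv, List.append_nil, zero_add]
    have hrhs : dfs_alt n S V
        = (scanUp S (n + 1) (scanDown S (n - 1) (PySem.Set.add V n) 1).2 (scanDown S (n - 1) (PySem.Set.add V n) 1).1).1 := by
      rw [dfs_alt, if_neg hv]
    rw [hlhs, hrhs]
    have hnV1 : n ∈ PySem.Set.add V n := (PySem.Set.mem_add _ _ _).mpr (Or.inr rfl)
    have step1 : dfsLoop S (((if n + 1 ∈ S then [n + 1] else []) ++ (if n - 1 ∈ S then [n - 1] else []))) (PySem.Set.add V n) 1
        = dfsLoop S (if n - 1 ∈ S then [n - 1] else []) (scanUp S (n + 1) (PySem.Set.add V n) 1).2 (scanUp S (n + 1) (PySem.Set.add V n) 1).1 := by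
      by_cases h2 : n + 1 ∈ S
      · rw [if_pos h2, List.singleton_append]
        exact up_phase S (n + 1) (PySem.Set.add V n) 1 _ h2
          (Or.inl (by rw [show n + 1 - 1 = n from by ring]; exact hnV1))
      · rw [if_neg h2, List.nil_append]
        rw [show scanUp S (n + 1) (PySem.Set.add V n) 1 = (1, PySem.Set.add V n) from by
          rw [scanUp, dif_neg (fun hc => h2 hc.1)]]
    have hnA2 : n ∈ (scanUp S (n + 1) (PySem.Set.add V n) 1).2 := by
      obtain ⟨L, hL, -⟩ := scanUp_visited S (n + 1) (PySem.Set.add V n) 1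
      rw [hL]; exact List.mem_append.mpr (Or.inl hnV1)
    have step2 : dfsLoop S (if n - 1 ∈ S then [n - 1] else []) (scanUp S (n + 1) (PySem.Set.add V n) 1).2 (scanUp S (n + 1) (PySem.Set.add V n) 1).1
        = (scanDown S (n - 1) (scanUp S (n + 1) (PySem.Set.add V n) 1).2 (scanUp S (n + 1) (PySem.Set.add V n) 1).1).1 := by
      by_cases h1 : n - 1 ∈ S
      · rw [if_pos h1]
        rw [down_phase S (n - 1) _ _ [] h1
          (Or.inl (by rw [show n - 1 + 1 = n from by ring]; exact hnA2)), dfsLoop]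
      · rw [if_neg h1, dfsLoop]
        rw [show scanDown S (n - 1) (scanUp S (n + 1) (PySem.Set.add V n) 1).2 (scanUp S (n + 1) (PySem.Set.add V n) 1).1
              = ((scanUp S (n + 1) (PySem.Set.add V n) 1).1, (scanUp S (n + 1) (PySem.Set.add V n) 1).2) from by
          rw [scanDown, dif_neg (fun hc => h1 hc.1)]]
    rw [step1, step2]
    obtain ⟨LU, hLU, hLUge⟩ := scanUp_visited S (n + 1) (PySem.Set.add V n) 1
    obtain ⟨LD, hLD, hLDle⟩ := scanDown_visited S (n - 1) (PySem.Set.add V n) 1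
    have hdcongr : ∀ c : Int, (scanDown S (n - 1) (scanUp S (n + 1) (PySem.Set.add V n) 1).2 c).1
        = (scanDown S (n - 1) (PySem.Set.add V n) c).1 := by
      intro c
      apply scanDown_congr
      intro y hy
      rw [hLU]
      simp only [List.mem_append]
      constructor
      · rintro (h | h)
        · exact h
        · exact absurd (hLUge y h) (by omega)
      · exact Or.inl
    have hucongr : ∀ c : Int, (scanUp S (n + 1) (scanDown S (n - 1) (PySem.Set.add V n) 1).2 c).1
        = (scanUp S (n + 1) (PySem.Set.add V n) c).1 := by
      intro c
      apply scanUp_congr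
      intro y hy
      rw [hLD]
      simp only [List.mem_append]
      constructor
      · rintro (h | h)
        · exact h
        · exact absurd (hLDle y h) (by omega)
      · exact Or.inl
    rw [scanDown_shift S (n - 1) _ (scanUp S (n + 1) (PySem.Set.add V n) 1).1 0,
        scanUp_shift S (n + 1) _ (scanDown S (n - 1) (PySem.Set.add V n) 1).1 0]
    simp only []
    rw [hdcongr 0, hucongr 0]
    rw [scanUp_shift S (n + 1) (PySem.Set.add V n) 1 0,
        scanDown_shift S (n - 1) (PySem.Set.add V n) 1 0]
    simp only []
    ring
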